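-- pv_equiv track=rewrite | github.com/applebiter/nico | nico/domain/services/ranking.py | _rank_before
-- ===== SOURCE A (Python) =====
-- def _rank_before(after: str) -> str:
--     """Generate a rank key before the given key."""
--     ALPHABET = 'abcdefghijklmnopqrstuvwxyz'
--
--     # Get the first character of 'after'
--     first_char = after[0]
--     first_idx = ALPHABET.index(first_char)
--
--     if first_idx > 0:
--         # We can just decrement the first character
--         mid_idx = first_idx // 2
--         return ALPHABET[mid_idx]
--     else:
--         # First char is 'a', we need to add a suffix
--         # Return something like "a" + midpoint of next char
--         if len(after) > 1:
--             return after[0] + _rank_before(after[1:])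
--         else:
--             # Edge case: after is "a", return something before it
--             return ALPHABET[0] + ALPHABET[len(ALPHABET) // 2]
-- ===== SOURCE B (Python) =====
-- def _rank_before(after: str) -> str:
--     """Generate a rank key before the given key (single scan, no recursion)."""
--     ALPHABET = 'abcdefghijklmnopqrstuvwxyz'
--     j = 0
--     while j < len(after) and after[j] == 'a':
--         j += 1
--     if j == len(after):
--         # whole string is 'a's: keep them and append the alphabet midpoint
--         return 'a' * j + 'n'
--     return 'a' * j + ALPHABET[ALPHABET.index(after[j]) // 2]
-- ===== Notes on version B (the rewrite author's own statement) =====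
-- stated objective: simpler
-- what changed: Replaced the slice-and-recurse descent with a single iterative scan that counts the leading 'a's and then builds the answer in one expression.
import Mathlib
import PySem

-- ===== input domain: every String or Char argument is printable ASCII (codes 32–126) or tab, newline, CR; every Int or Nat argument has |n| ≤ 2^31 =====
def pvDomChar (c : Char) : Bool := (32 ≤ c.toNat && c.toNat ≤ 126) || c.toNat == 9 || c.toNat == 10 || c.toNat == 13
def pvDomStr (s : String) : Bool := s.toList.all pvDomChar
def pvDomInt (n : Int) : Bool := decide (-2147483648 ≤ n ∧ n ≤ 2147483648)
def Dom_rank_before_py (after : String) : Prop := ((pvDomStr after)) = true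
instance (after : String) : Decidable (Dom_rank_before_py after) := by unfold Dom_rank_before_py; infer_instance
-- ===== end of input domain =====

-- B replaces A's slice-and-recurse descent with one iterative scan counting the leading 'a's (simpler; return value only).

-- ===== PORT A =====
-- ALPHABET = 'abcdefghijklmnopqrstuvwxyz'
def pvAlpha : List Char :=
  ['a','b','c','d','e','f','g','h','i','j','k','l','m',
   'n','o','p','q','r','s','t','u','v','w','x','y','z']

-- literal recursion of A on the character list; none = the Python raises (IndexError/ValueError)
def rank_before_core : List Char → Option (List Char)
  | [] => none                                   -- after[0] raises IndexError
  | c :: rest =>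
    match PySem.List.index? pvAlpha c with       -- ALPHABET.index(first_char); none = ValueError
    | none => none
    | some i =>
      if 0 < i then some [pvAlpha.getD (i / 2) ' ']
      else
        match rest with
        | [] => some [pvAlpha.getD 0 ' ', pvAlpha.getD 13 ' ']   -- ALPHABET[0] + ALPHABET[26 // 2]
        | _ :: _ =>
          match rank_before_core rest with
          | none => none
          | some s => some (c :: s)              -- after[0] + _rank_before(after[1:])

def rank_before_py (after : String) : String :=
  match rank_before_core after.toList with
  | some l => String.ofList l
  | none => ""                                   -- unreachable under Pre_ (the Python raises here)

-- ===== PORT B =====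
def rank_before_py_alt (after : String) : String :=
  let cs := after.toList
  let j := (cs.takeWhile (fun c => c == 'a')).length            -- the while-loop scan for the first non-'a'
  if j = cs.length then String.ofList (List.replicate j 'a' ++ ['n'])
  else
    match PySem.List.index? pvAlpha (cs.getD j ' ') with        -- ALPHABET.index(after[j]); none = ValueError
    | some i => String.ofList (List.replicate j 'a' ++ [pvAlpha.getD (i / 2) ' '])
    | none => ""                                                -- unreachable under Pre_ (the Python raises here)

-- ===== PRECONDITION & SPEC =====
-- Pre_ excludes exactly the inputs where the Python A raises: the empty string (IndexError)
-- and strings whose first non-'a' character is not a lowercase letter (ValueError).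
def Pre_rank_before_py (after : String) : Prop :=
  after.toList ≠ [] ∧ (after.toList.dropWhile (fun c => c == 'a')).headD 'a' ∈ pvAlpha
instance (after : String) : Decidable (Pre_rank_before_py after) := by
  unfold Pre_rank_before_py; infer_instance
def pvWitness_rank_before_py : String := "aab"

def Spec_rank_before_py (after : String) (out : String) : Prop := out = rank_before_py_alt after
instance (after : String) (out : String) : Decidable (Spec_rank_before_py after out) := by unfold Spec_rank_before_py; infer_instance

-- ===== CLAIM (what is proved, stated in full; the proofs are below) =====
def Claim_equal_rank_before_py : Prop := ∀ (after : String), Dom_rank_before_py after → Pre_rank_before_py after → Spec_rank_before_py after (rank_before_py after)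

-- ===== LEMMAS AND PROOFS =====

-- the list-level body of B's port
def altL (cs : List Char) : List Char :=
  let j := (cs.takeWhile (fun c => c == 'a')).length
  if j = cs.length then List.replicate j 'a' ++ ['n']
  else
    match PySem.List.index? pvAlpha (cs.getD j ' ') with
    | some i => List.replicate j 'a' ++ [pvAlpha.getD (i / 2) ' ']
    | none => []

theorem alt_eq_altL (after : String) :
    rank_before_py_alt after = String.ofList (altL after.toList) := by
  simp only [rank_before_py_alt, altL]
  by_cases h : (after.toList.takeWhile (fun c => c == 'a')).length = after.toList.length
  · rw [if_pos h, if_pos h]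
  · rw [if_neg h, if_neg h]
    cases PySem.List.index? pvAlpha (after.toList.getD ((after.toList.takeWhile (fun c => c == 'a')).length) ' ') <;> rfl

theorem idx_pos (c : Char) (hmem : c ∈ pvAlpha) (hne : ¬ c = 'a') :
    PySem.List.index? pvAlpha c = some ((PySem.List.index? pvAlpha c).getD 0) ∧
      0 < (PySem.List.index? pvAlpha c).getD 0 := by
  fin_cases hmem <;> first | (exact absurd rfl hne) | decide

theorem takeWhile_len_le (p : Char → Bool) (cs : List Char) :
    (cs.takeWhile p).length ≤ cs.length := by
  induction cs with
  | nil => simp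
  | cons c rest ih =>
    by_cases hp : p c
    · simp [List.takeWhile, hp]
      omega
    · simp [List.takeWhile, hp]

theorem dropWhile_eq_drop (p : Char → Bool) (cs : List Char) :
    cs.dropWhile p = cs.drop ((cs.takeWhile p).length) := by
  induction cs with
  | nil => simp
  | cons c rest ih =>
    by_cases hp : p c <;> simp [List.takeWhile, List.dropWhile, hp, ih]

theorem dropWhile_headD (p : Char → Bool) (cs : List Char)
    (h : (cs.takeWhile p).length < cs.length) (d : Char) :
    (cs.dropWhile p).headD d = cs[(cs.takeWhile p).length] := by
  rw [dropWhile_eq_drop]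
  have h1 : (cs.drop ((cs.takeWhile p).length)).head? = cs[(cs.takeWhile p).length]? :=
    List.head?_drop
  cases hh : cs.drop ((cs.takeWhile p).length) with
  | nil =>
    exfalso
    have := congrArg List.length hh
    simp at this
    omega
  | cons x xs =>
    rw [hh] at h1
    simp [List.getElem?_eq_getElem h] at h1
    simp [h1]

theorem core_eq (cs : List Char) (hne : cs ≠ [])
    (hmem : (cs.dropWhile (fun c => c == 'a')).headD 'a' ∈ pvAlpha) :
    rank_before_core cs = some (altL cs) := by
  induction cs with
  | nil => exact absurd rfl hne
  | cons c rest ih =>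
    by_cases hc : c = 'a'
    · subst hc
      have htake : (('a' :: rest).takeWhile (fun c => c == 'a')) =
          'a' :: rest.takeWhile (fun c => c == 'a') := by simp [List.takeWhile]
      have hdropc : (('a' :: rest).dropWhile (fun c => c == 'a')) =
          rest.dropWhile (fun c => c == 'a') := by simp [List.dropWhile]
      cases rest with
      | nil => decide
      | cons r rs =>
        have hmem' : ((r :: rs).dropWhile (fun c => c == 'a')).headD 'a' ∈ pvAlpha := by
          rw [hdropc] at hmem; exact hmem
        have ihr := ih (by simp) hmem'
        have hidx : PySem.List.index? pvAlpha 'a' = some 0 := by decide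
        have haltL : altL ('a' :: r :: rs) = 'a' :: altL (r :: rs) := by
          unfold altL
          rw [htake]
          simp only [List.length_cons]
          by_cases hj : ((r :: rs).takeWhile (fun c => c == 'a')).length = rs.length + 1
          · rw [if_pos (by omega), if_pos hj, List.replicate_succ]
            simp
          · have hlt : ((r :: rs).takeWhile (fun c => c == 'a')).length < rs.length + 1 := by
              have := takeWhile_len_le (fun c => c == 'a') (r :: rs)
              simp only [List.length_cons] at this
              omega
            have hlt' : ((r :: rs).takeWhile (fun c => c == 'a')).length < (r :: rs).length := by
              simpa using hlt
            rw [if_neg (by omega), if_neg hj]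
            have hget : ('a' :: r :: rs).getD
                (((r :: rs).takeWhile (fun c => c == 'a')).length + 1) ' ' =
                (r :: rs).getD (((r :: rs).takeWhile (fun c => c == 'a')).length) ' ' := by
              simp [List.getD]
            rw [hget]
            have hgetE : (r :: rs).getD (((r :: rs).takeWhile (fun c => c == 'a')).length) ' '
                = (r :: rs)[((r :: rs).takeWhile (fun c => c == 'a')).length] :=
              List.getD_eq_getElem _ _ hlt'
            have hmem'' : (r :: rs)[((r :: rs).takeWhile (fun c => c == 'a')).length]
                ∈ pvAlpha := by
              rw [← dropWhile_headD (fun c => c == 'a') (r :: rs) hlt' 'a']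
              exact hmem'
            have hsome : (PySem.List.index? pvAlpha
                (r :: rs)[((r :: rs).takeWhile (fun c => c == 'a')).length]).isSome := by
              rw [PySem.List.index?_isSome_iff]; exact hmem''
            obtain ⟨i, hi⟩ := Option.isSome_iff_exists.mp hsome
            rw [hgetE, hi]
            simp [List.replicate_succ]
        rw [haltL]
        conv_lhs => rw [rank_before_core]
        rw [hidx, ihr]
        simp
    · have hbeq : (c == 'a') = false := by simp [hc]
      have htake : ((c :: rest).takeWhile (fun c => c == 'a')) = [] := by
        simp [List.takeWhile, hbeq]
      have hdropc : ((c :: rest).dropWhile (fun c => c == 'a')) = c :: rest := by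
        simp [List.dropWhile, hbeq]
      rw [hdropc] at hmem
      simp only [List.headD] at hmem
      obtain ⟨i, hi, hpos⟩ : ∃ i, PySem.List.index? pvAlpha c = some i ∧ 0 < i :=
        ⟨_, (idx_pos c hmem hc).1, (idx_pos c hmem hc).2⟩
      unfold rank_before_core altL
      rw [htake]
      simp only [List.length_cons, List.length_nil, hi]
      rw [if_pos hpos]
      have h0 : ¬ ((0 : Nat) = rest.length + 1) := by omega
      rw [if_neg h0]
      rw [PySem.List.index?_eq_idxOf?] at hi
      simp [List.getD, hi]

-- ===== VERDICT (by name: the statement is the Claim_ definition above) =====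
theorem rank_before_py_spec : Claim_equal_rank_before_py := by
  intro after _ hpre
  obtain ⟨h1, h2⟩ := hpre
  unfold Spec_rank_before_py
  rw [alt_eq_altL, rank_before_py, core_eq after.toList h1 h2]
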